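-- pv_equiv track=rewrite | github.com/UNWSP2024/week-8-trblair | program_1.py | initials_generator
-- ===== SOURCE A (Python) =====
-- def initials_generator(personsName):
--
--     personsInitials = ""
--     #    Add your logic here
--     finallist=[]
--     list1=personsName.split()
--     for x in list1:
--         finallist.append(x[0])
--     personsInitials=''.join(finallist)
--     return personsInitials.strip()
-- ===== SOURCE B (Python) =====
-- def initials_generator(personsName):
--     buf = []
--     prev = ' '
--     for ch in personsName:
--         if not ch.isspace() and prev.isspace():
--             buf.append(ch)
--         prev = ch
--     return ''.join(buf)
-- ===== Notes on version B (the rewrite author's own statement) =====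
-- stated objective: alternative
-- what changed: Replaces split()+per-word indexing+join+strip with a single character scan that appends a character exactly at each word boundary (previous char whitespace or string start); trades CPython's C-level split for an explicit one-pass loop with no intermediate word lists.
import Mathlib
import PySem

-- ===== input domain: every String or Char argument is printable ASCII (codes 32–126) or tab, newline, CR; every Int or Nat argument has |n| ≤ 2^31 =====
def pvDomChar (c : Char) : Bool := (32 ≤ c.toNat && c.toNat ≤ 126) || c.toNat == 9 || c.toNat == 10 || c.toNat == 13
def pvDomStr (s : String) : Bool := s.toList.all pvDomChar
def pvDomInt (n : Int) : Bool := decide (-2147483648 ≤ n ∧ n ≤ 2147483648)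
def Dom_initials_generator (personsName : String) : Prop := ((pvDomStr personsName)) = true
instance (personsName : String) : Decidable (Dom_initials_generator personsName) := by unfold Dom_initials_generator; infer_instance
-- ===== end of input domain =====

-- B replaces split()+index+join+strip by a single character scan appending at word boundaries (objective: alternative decomposition, same O(n) cost).


-- ===== PORT A =====
def initials_generator (personsName : String) : String :=
  let list1 := PySem.Str.split₀ personsName
  -- x[0]: split() words are never empty, so pyGet? always returns some; the getD default is unreachable
  let finallist := list1.foldl (fun acc x => acc ++ [(PySem.Str.pyGet? x 0).getD ' ']) ([] : List Char)
  let personsInitials := String.ofList (PySem.Chars.join [] (finallist.map (fun c => [c])))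
  PySem.Str.strip personsInitials

-- ===== PORT B =====
def initials_generator_alt (personsName : String) : String :=
  String.ofList
    (personsName.toList.foldl
      (fun (st : List Char × Char) (ch : Char) =>
        (if PySem.Chars.isspace ch = false && PySem.Chars.isspace st.2 then st.1 ++ [ch] else st.1,
         ch))
      (([] : List Char), ' ')).1

-- ===== PRECONDITION & SPEC =====
def Spec_initials_generator (personsName : String) (out : String) : Prop := out = initials_generator_alt personsName
instance (personsName : String) (out : String) : Decidable (Spec_initials_generator personsName out) := by unfold Spec_initials_generator; infer_instance

-- ===== CLAIM (what is proved, stated in full; the proofs are below) =====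
def Claim_equal_initials_generator : Prop := ∀ (personsName : String), Dom_initials_generator personsName → Spec_initials_generator personsName (initials_generator personsName)

-- ===== LEMMAS AND PROOFS =====

-- head extraction A applies to each word
def pvHd (w : List Char) : Char := (w[0]?).getD ' '

-- recursive specification of B's scan: flag = "previous char was whitespace (or string start)"
def pvScan (cs : List Char) (b : Bool) : List Char :=
  match cs with
  | [] => []
  | c :: rest =>
      (if PySem.Chars.isspace c = false && b then [c] else []) ++ pvScan rest (PySem.Chars.isspace c)

theorem pvFoldl_scan (cs : List Char) (buf : List Char) (prev : Char) :
    (cs.foldl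
      (fun (st : List Char × Char) (ch : Char) =>
        (if PySem.Chars.isspace ch = false && PySem.Chars.isspace st.2 then st.1 ++ [ch] else st.1,
         ch)) (buf, prev)).1 = buf ++ pvScan cs (PySem.Chars.isspace prev) := by
  induction cs generalizing buf prev with
  | nil => simp [pvScan]
  | cons c rest ih =>
      simp only [List.foldl_cons, pvScan]
      rw [ih]
      split <;> simp

theorem pvSplitGo_heads (cs : List Char) (cur : List Char) (acc : List (List Char)) :
    (PySem.Chars.split₀.go cs cur acc).map pvHd
      = acc.reverse.map pvHd ++ (if cur = [] then [] else [pvHd cur.reverse]) ++ pvScan cs cur.isEmpty := by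
  induction cs generalizing cur acc with
  | nil =>
      cases cur with
      | nil => simp [PySem.Chars.split₀.go, pvScan]
      | cons a t => simp [PySem.Chars.split₀.go, pvScan]
  | cons c rest ih =>
      by_cases hs : PySem.Chars.isspace c = true
      · cases cur with
        | nil => simp [PySem.Chars.split₀.go, hs, ih, pvScan]
        | cons a t =>
            simp only [PySem.Chars.split₀.go, hs, if_true, List.isEmpty_cons, if_false,
              Bool.false_eq_true]
            rw [ih]
            simp [pvScan, hs]
      · have hs' : PySem.Chars.isspace c = false := by simpa using hs
        cases cur with
        | nil =>
            simp only [PySem.Chars.split₀.go, hs', Bool.false_eq_true, if_false]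
            rw [ih]
            simp [pvScan, hs', pvHd]
        | cons a t =>
            simp only [PySem.Chars.split₀.go, hs', Bool.false_eq_true, if_false]
            rw [ih]
            have hhd : pvHd (t.reverse ++ [a, c]) = pvHd (t.reverse ++ [a]) := by
              have e : t.reverse ++ [a, c] = (t.reverse ++ [a]) ++ [c] := by simp
              rw [e]
              simp only [pvHd]
              rw [List.getElem?_append_left (by simp)]
            simp [pvScan, hs', hhd]

theorem pvSplit_heads (cs : List Char) :
    (PySem.Chars.split₀ cs).map pvHd = pvScan cs true := by
  simpa using pvSplitGo_heads cs [] []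

theorem pvScan_nospace (cs : List Char) (b : Bool) :
    ∀ c ∈ pvScan cs b, PySem.Chars.isspace c = false := by
  induction cs generalizing b with
  | nil => simp [pvScan]
  | cons c rest ih =>
      intro x hx
      simp only [pvScan, List.mem_append] at hx
      rcases hx with hx | hx
      · split at hx
        · rename_i h
          simp only [List.mem_singleton] at hx
          subst hx
          exact of_decide_eq_true (Bool.and_eq_true _ _ |>.mp h).1
        · simp at hx
      · exact ih _ x hx

theorem pvStrip_nospace (l : List Char) (h : ∀ c ∈ l, PySem.Chars.isspace c = false) :
    PySem.Chars.strip l = l := by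
  unfold PySem.Chars.strip PySem.Chars.lstrip PySem.Chars.rstrip
  have h1 : List.dropWhile PySem.Chars.isspace l = l :=
    List.dropWhile_eq_self_iff.mpr (fun hl => by simp [h _ (l.getElem_mem hl)])
  rw [h1]
  have h2 : List.dropWhile PySem.Chars.isspace l.reverse = l.reverse :=
    List.dropWhile_eq_self_iff.mpr (fun hl => by
      have hm := h _ (List.mem_reverse.mp (l.reverse.getElem_mem hl))
      simp only [List.getElem_reverse, Nat.sub_zero] at hm
      simp [hm])
  rw [h2, List.reverse_reverse]

theorem pvFoldl_map (l : List (String)) (a : List Char) :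
    l.foldl (fun acc x => acc ++ [(PySem.Str.pyGet? x 0).getD ' ']) a
      = a ++ l.map (fun x => (PySem.Str.pyGet? x 0).getD ' ') := by
  induction l generalizing a with
  | nil => simp
  | cons x t ih => rw [List.foldl_cons, ih, List.map_cons]; simp

-- ===== VERDICT (by name: the statement is the Claim_ definition above) =====
theorem initials_generator_spec : Claim_equal_initials_generator := by
  intro s _
  unfold Spec_initials_generator initials_generator initials_generator_alt
  rw [pvFoldl_scan]
  simp only [List.nil_append]
  have hsp : PySem.Chars.isspace ' ' = true := by decide
  rw [hsp]
  rw [pvFoldl_map, List.nil_append]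
  have hmap : (PySem.Str.split₀ s).map (fun x => (PySem.Str.pyGet? x 0).getD ' ')
      = pvScan s.toList true := by
    rw [← pvSplit_heads]
    unfold PySem.Str.split₀
    rw [List.map_map]
    apply List.map_congr_left
    intro w hw
    simp [pvHd, PySem.Str.pyGet?, PySem.List.pyGet?, PySem.List.pyIdx?]
    rcases w with _ | ⟨y, ys⟩ <;> simp
  rw [hmap]
  rw [PySem.Chars.join_nil_singletons]
  unfold PySem.Str.strip
  have : (String.ofList (pvScan s.toList true)).toList = pvScan s.toList true := by simp
  rw [this, pvStrip_nospace _ (pvScan_nospace _ _)]
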